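-- pv_equiv track=rewrite | github.com/saisrinivaslakkakula/pythonLeetcode | 670-maximum-swap/670-maximum-swap.py | findnextmax
-- ===== SOURCE A (Python) =====
-- def findnextmax(n,i,num):
--     j = len(num)-1
--     max_ = n
--     max_i = i
--     while j>i:
--         if num[j] > max_:
--             max_ = num[j]
--             max_i = j
--         j-=1
--     return max_i if max_>n else None
-- ===== SOURCE B (Python) =====
-- def findnextmax(n, i, num):
--     suf = [num[j] for j in range(i + 1, len(num))]
--     if not suf:
--         return None
--     m = max(suf)
--     if m <= n:
--         return None
--     # rightmost occurrence of m in num (it lies in the suffix, since m occurs there)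
--     return len(num) - 1 - num[::-1].index(m)
-- ===== Notes on version B (the rewrite author's own statement) =====
-- stated objective: alternative
-- what changed: Replaces A's single fused right-to-left scan carrying (max_, max_i) state with two independent passes: a comprehension collects the suffix values num[i+1:], max() finds their maximum, and the rightmost occurrence of that maximum is located via num[::-1].index(m).
import Mathlib
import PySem

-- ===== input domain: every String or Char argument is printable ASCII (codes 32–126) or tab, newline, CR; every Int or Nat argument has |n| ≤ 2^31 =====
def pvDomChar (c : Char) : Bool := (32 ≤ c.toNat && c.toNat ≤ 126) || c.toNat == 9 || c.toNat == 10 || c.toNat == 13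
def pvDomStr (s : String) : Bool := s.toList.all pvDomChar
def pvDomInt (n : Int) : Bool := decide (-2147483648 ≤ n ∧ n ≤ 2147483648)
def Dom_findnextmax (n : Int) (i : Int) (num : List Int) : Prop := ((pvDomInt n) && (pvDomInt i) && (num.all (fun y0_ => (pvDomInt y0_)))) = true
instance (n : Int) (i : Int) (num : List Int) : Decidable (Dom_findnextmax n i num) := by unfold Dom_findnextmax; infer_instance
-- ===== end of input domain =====

-- B replaces A's single fused right-to-left scan by separate passes (collect the suffix values,
-- max(), then rightmost index via a reversed-list index lookup); objective: alternative decomposition, not speed.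

-- ===== PORT A =====
-- A's 'while j > i:' loop; fuel = number of iterations, state = (max_, max_i).
def findnextmaxGo (num : List Int) : Nat → Int → Int × Int → Int × Int
  | 0, _, st => st
  | Nat.succ k, j, st =>
      match PySem.List.pyGet? num j with
      | none => st      -- IndexError in Python; outside Pre_findnextmax
      | some v => findnextmaxGo num k (j - 1) (if v > st.1 then (v, j) else st)

def findnextmax (n : Int) (i : Int) (num : List Int) : Option Int :=
  let j : Int := (num.length : Int) - 1
  let st := findnextmaxGo num (j - i).toNat j (n, i)
  if st.1 > n then some st.2 else none

-- ===== PORT B =====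
def findnextmax_alt (n : Int) (i : Int) (num : List Int) : Option Int :=
  -- suf = [num[j] for j in range(i+1, len(num))]; pyGet? = none is Python's IndexError, outside Pre_findnextmax
  let suf := (PySem.List.pyRange (i + 1) (num.length : Int) 1).filterMap
      (fun j => PySem.List.pyGet? num j)
  match PySem.List.max? suf (fun x => x) with      -- 'if not suf: return None' + m = max(suf)
  | none => none
  | some m =>
    if m ≤ n then none
    else
      match PySem.List.index? num.reverse m with   -- num[::-1].index(m)
      | none => none                               -- unreachable: m ∈ num
      | some k => some ((num.length : Int) - 1 - (k : Int))

-- ===== PRECONDITION & SPEC =====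
-- Pre_ holds exactly where Python A returns normally: for i < -len(num)-1 both A's wrapped
-- index walk and B's comprehension index past the front of the list and raise IndexError.
def Pre_findnextmax (n : Int) (i : Int) (num : List Int) : Prop := -(num.length : Int) - 1 ≤ i
instance (n : Int) (i : Int) (num : List Int) : Decidable (Pre_findnextmax n i num) := by unfold Pre_findnextmax; infer_instance
def pvWitness_findnextmax : Int × Int × List Int := (3, 0, [3, 7, 2, 7, 5])

def Spec_findnextmax (n : Int) (i : Int) (num : List Int) (out : Option Int) : Prop := out = findnextmax_alt n i num
instance (n : Int) (i : Int) (num : List Int) (out : Option Int) : Decidable (Spec_findnextmax n i num out) := by unfold Spec_findnextmax; infer_instance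

-- ===== CLAIM (what is proved, stated in full; the proofs are below) =====
def Claim_equal_findnextmax : Prop := ∀ (n : Int) (i : Int) (num : List Int), Dom_findnextmax n i num → Pre_findnextmax n i num → Spec_findnextmax n i num (findnextmax n i num)

-- ===== LEMMAS AND PROOFS =====

-- the loop body of A, viewed as a step on (value, absolute index) pairs (proof-internal)
def fmStep (pv : Int × Nat) (acc : Int × Int) : Int × Int :=
  if pv.1 > acc.1 then (pv.1, (pv.2 : Int)) else acc

lemma foldl_max_pull (t : List Int) (a b : Int) :
    t.foldl max (max a b) = max b (t.foldl max a) := by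
  induction t generalizing a b with
  | nil => simp [max_comm]
  | cons x t ih =>
      simp only [List.foldl_cons]
      rw [show max (max a b) x = max (max a x) b by
            rw [max_assoc, max_comm b x, ← max_assoc], ih]

lemma foldr_max_eq_foldl (t : List Int) (a : Int) :
    t.foldr max a = t.foldl max a := by
  induction t generalizing a with
  | nil => rfl
  | cons x t ih => simp only [List.foldr_cons, List.foldl_cons, ih, foldl_max_pull]

lemma zipIdx_pairwise (l : List Int) (p : Nat) :
    (l.zipIdx p).Pairwise (fun x y => x.2 < y.2) := by
  rw [List.pairwise_iff_getElem]
  intro a b ha hb hab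
  simp only [List.getElem_zipIdx]
  omega

lemma go_prefix (ys t : List Int) :
    ∀ (k : Nat) (j : Int) (st : Int × Int), (k : Int) ≤ j + 1 → j < (ys.length : Int) →
      findnextmaxGo (ys ++ t) k j st = findnextmaxGo ys k j st := by
  intro k
  induction k with
  | zero => intro j st _ _; rfl
  | succ k ih =>
      intro j st hk hj
      have hj0 : 0 ≤ j := by omega
      have hjl : j.toNat < ys.length := by omega
      rw [findnextmaxGo, findnextmaxGo,
        PySem.List.pyGet?_of_nonneg _ hj0, PySem.List.pyGet?_of_nonneg _ hj0,
        List.getElem?_append_left hjl]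
      have := List.getElem?_eq_getElem hjl
      rw [this]
      exact ih (j - 1) _ (by omega) (by omega)

lemma go_eq_foldr (num : List Int) (i : Int) (hi : -1 ≤ i) :
    ∀ st : Int × Int,
      findnextmaxGo num (((num.length : Int) - 1 - i).toNat) ((num.length : Int) - 1) st
        = ((num.drop (i+1).toNat).zipIdx (i+1).toNat).foldr fmStep st := by
  induction num using List.reverseRecOn with
  | nil =>
      intro st
      have h0 : ((([] : List Int).length : Int) - 1 - i).toNat = 0 := by simp; omega
      rw [h0]
      simp [findnextmaxGo]
  | append_singleton ys a ih =>
      intro st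
      set p : Nat := (i + 1).toNat with hp
      by_cases hc : (ys.length : Int) ≤ i
      · have hfuel : (((ys ++ [a]).length : Int) - 1 - i).toNat = 0 := by
          simp; omega
        have hdrop : (ys ++ [a]).drop p = [] := by
          apply List.drop_eq_nil_of_le
          simp; omega
        rw [hfuel, hdrop]
        rfl
      · push_neg at hc
        have hple : p ≤ ys.length := by omega
        have hfuel : (((ys ++ [a]).length : Int) - 1 - i).toNat
            = ((ys.length : Int) - 1 - i).toNat + 1 := by simp; omega
        have hlen : ((ys ++ [a]).length : Int) - 1 = (ys.length : Int) := by simp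
        rw [hfuel, hlen, findnextmaxGo]
        rw [show (ys ++ [a]) = ys ++ a :: [] from rfl, PySem.List.pyGet?_append_length]
        dsimp only
        rw [go_prefix ys [a] _ _ _ (by omega) (by omega)]
        rw [ih]
        -- RHS
        rw [List.drop_append_of_le_length hple, List.zipIdx_append, List.foldr_append]
        have hidx : p + (ys.drop p).length = ys.length := by simp [List.length_drop]; omega
        rw [hidx]
        simp only [List.zipIdx, List.foldr_cons, List.foldr_nil]
        congr 1

lemma le_foldr_max (t : List Int) (a : Int) :
    a ≤ t.foldr max a ∧ ∀ y ∈ t, y ≤ t.foldr max a := by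
  induction t with
  | nil => simp
  | cons x t ih =>
      refine ⟨le_trans ih.1 (le_max_right _ _), ?_⟩
      intro y hy
      rcases List.mem_cons.1 hy with h | h
      · simp [h]
      · exact le_trans (ih.2 y h) (le_max_right _ _)

lemma foldr_char (l : List (Int × Nat)) (st : Int × Int)
    (hl : l.Pairwise (fun x y => x.2 < y.2)) :
    (l.foldr fmStep st).1 = (l.map (·.1)).foldr max st.1 ∧
    (l.foldr fmStep st = st ∨
      ∃ q : Nat, (l.foldr fmStep st).2 = (q : Int) ∧ ((l.foldr fmStep st).1, q) ∈ l ∧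
        ∀ pv ∈ l, q < pv.2 → pv.1 < (l.foldr fmStep st).1) := by
  induction l with
  | nil => exact ⟨rfl, Or.inl rfl⟩
  | cons x t ih =>
      have ht := List.Pairwise.sublist (List.sublist_cons_self x t) hl
      obtain ⟨ih1, ih2⟩ := ih ht
      have hmem_le : ∀ y ∈ t, y.1 ≤ (t.foldr fmStep st).1 := by
        intro y hy
        rw [ih1]
        exact (le_foldr_max _ _).2 _ (List.mem_map_of_mem hy)
      simp only [List.foldr_cons, List.map_cons]
      by_cases hx : x.1 > (t.foldr fmStep st).1
      · rw [show fmStep x (t.foldr fmStep st) = (x.1, (x.2 : Int)) from if_pos hx]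
        constructor
        · rw [ih1] at hx
          exact (max_eq_left (le_of_lt hx)).symm
        · right
          refine ⟨x.2, rfl, by simp, ?_⟩
          intro pv hpv hq
          rcases List.mem_cons.1 hpv with h | h
          · subst h; omega
          · exact lt_of_le_of_lt (hmem_le _ h) hx
      · rw [show fmStep x (t.foldr fmStep st) = t.foldr fmStep st from if_neg hx]
        constructor
        · rw [ih1] at hx ⊢
          exact (max_eq_right (not_lt.mp hx)).symm
        · rcases ih2 with h | ⟨q, hq1, hq2, hq3⟩
          · left; exact h
          · right
            refine ⟨q, hq1, List.mem_cons_of_mem _ hq2, ?_⟩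
            intro pv hpv hgt
            rcases List.mem_cons.1 hpv with h | h
            · subst h
              have : pv.2 < q := (List.pairwise_cons.1 hl).1 _ hq2
              omega
            · exact hq3 pv h hgt

-- the comprehension over range(a, len) collects exactly the suffix, for 0 ≤ a
lemma fm_drop (num : List Int) :
    ∀ (k : Nat) (a : Int), 0 ≤ a → ((num.length : Int) - a).toNat = k →
      (PySem.List.pyRange a (num.length : Int) 1).filterMap (fun j => PySem.List.pyGet? num j)
        = num.drop a.toNat := by
  intro k
  induction k with
  | zero =>
      intro a ha hk
      rw [PySem.List.pyRange_one_eq_nil (by omega), List.drop_eq_nil_of_le (by omega)]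
      rfl
  | succ k ih =>
      intro a ha hk
      have halt : a < (num.length : Int) := by omega
      rw [PySem.List.pyRange_one_cons halt, List.filterMap_cons,
        PySem.List.pyGet?_eq_some_getElem num ha halt]
      dsimp only
      rw [ih (a + 1) (by omega) (by omega)]
      have hlt : a.toNat < num.length := by omega
      rw [List.drop_eq_getElem_cons hlt]
      congr 2
      omega

-- ===== the main equivalence on -1 ≤ i =====
lemma findnextmax_eq_alt_nonneg (n i : Int) (num : List Int) (hpre : -1 ≤ i) :
    findnextmax n i num = findnextmax_alt n i num := by
  have h01 : 0 ≤ i + 1 := by omega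
  set p : Nat := (i + 1).toNat with hp
  set seg : List Int := num.drop p with hseg
  set E : List (Int × Nat) := seg.zipIdx p with hE
  set r : Int × Int := E.foldr fmStep (n, i) with hr
  have hA : findnextmax n i num = if r.1 > n then some r.2 else none := by
    have h0 : findnextmax n i num
        = (if (findnextmaxGo num (((num.length : Int) - 1 - i).toNat) ((num.length : Int) - 1) (n, i)).1 > n
            then some (findnextmaxGo num (((num.length : Int) - 1 - i).toNat) ((num.length : Int) - 1) (n, i)).2
            else none) := rfl
    rw [h0, go_eq_foldr num i hpre (n, i)]
  have hBslice : (PySem.List.pyRange (i + 1) (num.length : Int) 1).filterMap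
      (fun j => PySem.List.pyGet? num j) = seg :=
    fm_drop num (((num.length : Int) - (i+1)).toNat) (i+1) h01 rfl
  have hB0 : findnextmax_alt n i num
      = (match PySem.List.max? seg (fun x => x) with
          | none => none
          | some m =>
            if m ≤ n then none
            else
              match PySem.List.index? num.reverse m with
              | none => none
              | some k => some ((num.length : Int) - 1 - (k : Int))) := by
    unfold findnextmax_alt
    rw [hBslice]
  obtain ⟨hchar1, hchar2⟩ := foldr_char E (n, i) (zipIdx_pairwise seg p)
  have hmapfst : E.map (·.1) = seg := List.zipIdx_map_fst p seg
  rw [hmapfst, ← hr] at hchar1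
  have hseg_le_r : ∀ y ∈ seg, y ≤ r.1 := by
    rw [hchar1]; exact (le_foldr_max seg n).2
  match hsegc : seg with
  | [] =>
      have hr0 : r = (n, i) := by rw [hr, hE, hsegc]; rfl
      rw [hA, hr0, hB0, hsegc]
      simp [PySem.List.max?]
  | x :: t =>
      rw [hsegc] at hB0
      rw [PySem.List.max?_id_cons] at hB0
      have hseg_le_m : ∀ y ∈ seg, y ≤ List.foldl max x t := by
        intro y hy
        rw [hsegc] at hy
        rcases List.mem_cons.1 hy with h | h
        · subst h; exact (PySem.List.le_foldl_max t y).1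
        · exact (PySem.List.le_foldl_max t x).2 y h
      have hm_mem : List.foldl max x t ∈ seg := by
        rw [hsegc]
        rcases PySem.List.foldl_max_mem t x with h | h
        · rw [h]; exact List.mem_cons_self
        · exact List.mem_cons_of_mem _ h
      by_cases hgt : r.1 > n
      · -- A returns some r.2
        have hr_mem : r.1 ∈ seg := by
          rw [foldr_max_eq_foldl] at hchar1
          rcases PySem.List.foldl_max_mem seg n with h | h
          · exfalso; rw [← hchar1] at h; omega
          · rw [← hchar1] at h; exact h
        have hmeq : List.foldl max x t = r.1 :=
          le_antisymm (hseg_le_r _ hm_mem) (hseg_le_m _ hr_mem)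
        have hm_num : List.foldl max x t ∈ num := by
          rw [hseg] at hm_mem; exact List.mem_of_mem_drop hm_mem
        obtain ⟨k, hk⟩ := Option.isSome_iff_exists.1
          ((PySem.List.index?_isSome_iff _ _).2 (List.mem_reverse.2 hm_num))
        obtain ⟨pre, suf, hrev, hklen, hnotpre⟩ :=
          (PySem.List.index?_eq_some_iff _ _ k).1 hk
        have heq : num = suf.reverse ++ List.foldl max x t :: pre.reverse := by
          rw [← List.reverse_reverse num, hrev]
          simp
        have hL : num.length = suf.length + 1 + pre.length := by
          rw [heq]; simp; omega
        -- no index beyond suf.length carries the max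
        have hnum_at : ∀ j : Nat, num[j]? = some r.1 → j ≤ suf.length := by
          intro j hj
          by_contra hgt2
          rw [heq, List.getElem?_append_right (by simp; omega)] at hj
          obtain ⟨d, hd⟩ : ∃ d, j - suf.reverse.length = d + 1 := ⟨j - suf.reverse.length - 1, by simp; omega⟩
          rw [hd, List.getElem?_cons_succ] at hj
          exact hnotpre (List.mem_reverse.1 (hmeq ▸ List.mem_of_getElem? hj))
        have hnum_qstar : num[suf.length]? = some (List.foldl max x t) := by
          rw [heq, List.getElem?_append_right (by simp)]
          simp
        rcases hchar2 with h | ⟨q, hq1, hq2, hq3⟩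
        · exfalso; rw [← hr] at h; rw [h] at hgt; simp at hgt
        rw [← hr] at hq1 hq2 hq3
        obtain ⟨hpq, hqget⟩ := List.mem_zipIdx_iff_le_and_getElem?_sub.1 hq2
        simp only at hpq hqget
        have hnumq : num[q]? = some r.1 := by
          rw [hseg, List.getElem?_drop] at hqget
          rwa [show p + (q - p) = q by omega] at hqget
        have hqle : q ≤ suf.length := hnum_at q hnumq
        have hqge : suf.length ≤ q := by
          by_contra hlt
          have hpqs : p ≤ suf.length := by omega
          have hmemE : (List.foldl max x t, suf.length) ∈ E := by
            apply List.mem_zipIdx_iff_le_and_getElem?_sub.2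
            refine ⟨hpqs, ?_⟩
            rw [hseg, List.getElem?_drop, show p + (suf.length - p) = suf.length by omega]
            exact hnum_qstar
          have := hq3 _ hmemE (by simpa using by omega : q < (List.foldl max x t, suf.length).2)
          rw [hmeq] at this
          exact absurd this (lt_irrefl _)
        have hqeq : q = suf.length := le_antisymm hqle hqge
        rw [hA, if_pos hgt, hB0]
        dsimp only
        rw [if_neg (by omega : ¬ List.foldl max x t ≤ n)]
        rw [hk]
        rw [hq1, hqeq]
        refine congrArg some ?_
        omega
      · rw [hA, if_neg hgt, hB0]
        have hle : List.foldl max x t ≤ n := le_trans (hseg_le_r _ hm_mem) (by omega)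
        dsimp only
        rw [if_pos hle]

-- ===== wrapped region: -len-1 ≤ i ≤ -2 reduces to i = -1 on both sides =====

-- fuel splitting for A's loop (all visited indices must be in range)
lemma go_split (num : List Int) :
    ∀ (k1 : Nat) (k2 : Nat) (j : Int) (st : Int × Int),
      (∀ t : Nat, t < k1 → (PySem.List.pyGet? num (j - (t : Int))).isSome) →
      findnextmaxGo num (k1 + k2) j st
        = findnextmaxGo num k2 (j - (k1 : Int)) (findnextmaxGo num k1 j st) := by
  intro k1
  induction k1 with
  | zero =>
      intro k2 j st _
      simp [findnextmaxGo]
  | succ k1 ih =>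
      intro k2 j st h
      obtain ⟨v, hv⟩ := Option.isSome_iff_exists.1 (by simpa using h 0 (Nat.succ_pos _))
      have hstep : ∀ m, findnextmaxGo num (Nat.succ m) j st
          = findnextmaxGo num m (j - 1) (if v > st.1 then (v, j) else st) := by
        intro m
        rw [findnextmaxGo, hv]
      rw [show k1 + 1 + k2 = Nat.succ (k1 + k2) by omega, hstep, hstep]
      rw [ih k2 (j - 1) _ (by
        intro t ht
        have := h (t + 1) (by omega)
        rw [show j - 1 - (t : Int) = j - (((t + 1 : Nat) : Int)) by push_cast; ring]
        exact this
        )]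
      congr 1
      push_cast
      ring

-- extra iterations whose values never exceed the running max leave the state unchanged
lemma go_noop (num : List Int) :
    ∀ (k : Nat) (j : Int) (st : Int × Int),
      (∀ t : Nat, t < k → ∃ v, PySem.List.pyGet? num (j - (t : Int)) = some v ∧ v ≤ st.1) →
      findnextmaxGo num k j st = st := by
  intro k
  induction k with
  | zero => intro j st _; rfl
  | succ k ih =>
      intro j st h
      obtain ⟨v, hv, hle⟩ := h 0 (Nat.succ_pos _)
      rw [show j - ((0 : Nat) : Int) = j by push_cast; ring] at hv
      rw [findnextmaxGo, hv]
      dsimp only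
      rw [if_neg (by omega)]
      apply ih
      intro t ht
      obtain ⟨w, hw, hwle⟩ := h (t + 1) (by omega)
      refine ⟨w, ?_, hwle⟩
      rw [show j - 1 - (t : Int) = j - (((t + 1 : Nat) : Int)) by push_cast; ring]
      exact hw

-- the final first component is independent of the initial index; so is the whole state once it moved
lemma foldr_init_indep (l : List (Int × Nat)) (n a b : Int) :
    (l.foldr fmStep (n, a)).1 = (l.foldr fmStep (n, b)).1 ∧
    ((l.foldr fmStep (n, a)).1 ≠ n → l.foldr fmStep (n, a) = l.foldr fmStep (n, b)) := by
  induction l with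
  | nil => exact ⟨rfl, fun h => absurd rfl h⟩
  | cons x t ih =>
      obtain ⟨ih1, ih2⟩ := ih
      simp only [List.foldr_cons]
      by_cases hx : x.1 > (t.foldr fmStep (n, a)).1
      · rw [show fmStep x (t.foldr fmStep (n, a)) = (x.1, (x.2 : Int)) from if_pos hx,
          show fmStep x (t.foldr fmStep (n, b)) = (x.1, (x.2 : Int)) from if_pos (ih1 ▸ hx)]
        exact ⟨rfl, fun _ => rfl⟩
      · rw [show fmStep x (t.foldr fmStep (n, a)) = t.foldr fmStep (n, a) from if_neg hx,
          show fmStep x (t.foldr fmStep (n, b)) = t.foldr fmStep (n, b) from if_neg (ih1 ▸ hx)]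
        exact ⟨ih1, ih2⟩

lemma A_wrap (n i : Int) (num : List Int) (hlen : 1 ≤ num.length)
    (hi1 : -(num.length : Int) - 1 ≤ i) (hi2 : i ≤ -2) :
    findnextmax n i num = findnextmax n (-1) num := by
  set L : Nat := num.length with hLdef
  have hL1 : 1 ≤ (L : Int) := by exact_mod_cast hlen
  set K2 : Nat := (-1 - i).toNat with hK2
  have hfuel_i : ((L : Int) - 1 - i).toNat = L + K2 := by omega
  have hfuel_m1 : ((L : Int) - 1 - (-1)).toNat = L := by omega
  have hS := go_eq_foldr num (-1) (by omega)
  rw [hfuel_m1] at hS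
  have hdrop0 : ((-1 : Int) + 1).toNat = 0 := by decide
  rw [hdrop0, List.drop_zero] at hS
  -- A at i: split the loop after L in-range steps, then K2 no-op wrapped steps
  have hA : findnextmax n i num = (if ((num.zipIdx 0).foldr fmStep (n, i)).1 > n
      then some ((num.zipIdx 0).foldr fmStep (n, i)).2 else none) := by
    have h0 : findnextmax n i num
        = (if (findnextmaxGo num (((L : Int) - 1 - i).toNat) ((L : Int) - 1) (n, i)).1 > n
            then some (findnextmaxGo num (((L : Int) - 1 - i).toNat) ((L : Int) - 1) (n, i)).2
            else none) := rfl
    rw [h0, hfuel_i, go_split num L K2 ((L : Int) - 1) (n, i) (by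
      intro t ht
      rw [PySem.List.pyGet?_eq_some_getElem num (by omega) (by omega)]
      rfl)]
    rw [hS (n, i)]
    rw [go_noop num K2 _ _ ?_]
    intro t ht
    -- index (L-1) - L - t = -(t+1), in range since t+1 ≤ L
    have htL : t + 1 ≤ L := by omega
    have hidx : (L : Int) - 1 - (L : Nat) - (t : Int) = -(((t + 1 : Nat) : Int)) := by
      push_cast; ring
    rw [hidx, PySem.List.pyGet?_neg_natCast num (t + 1) (by omega) (by exact_mod_cast htL)]
    have hmem : L - (t + 1) < L := by omega
    rw [List.getElem?_eq_getElem hmem]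
    refine ⟨_, rfl, ?_⟩
    -- value ∈ num ≤ final max = foldr max n num = state.1
    obtain ⟨hc1, _⟩ := foldr_char (num.zipIdx 0) (n, i) (zipIdx_pairwise num 0)
    rw [List.zipIdx_map_fst 0 num] at hc1
    rw [hc1]
    exact (le_foldr_max num n).2 _ (List.getElem_mem _)
  have hAm1 : findnextmax n (-1) num = (if ((num.zipIdx 0).foldr fmStep (n, -1)).1 > n
      then some ((num.zipIdx 0).foldr fmStep (n, -1)).2 else none) := by
    have h0 : findnextmax n (-1) num
        = (if (findnextmaxGo num (((L : Int) - 1 - (-1)).toNat) ((L : Int) - 1) (n, -1)).1 > n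
            then some (findnextmaxGo num (((L : Int) - 1 - (-1)).toNat) ((L : Int) - 1) (n, -1)).2
            else none) := rfl
    rw [h0, hfuel_m1, hS (n, -1)]
  rw [hA, hAm1]
  obtain ⟨h1, h2⟩ := foldr_init_indep (num.zipIdx 0) n i (-1)
  by_cases hgt : ((num.zipIdx 0).foldr fmStep (n, i)).1 > n
  · rw [if_pos hgt, if_pos (h1 ▸ hgt), h2 (by omega)]
  · rw [if_neg hgt, if_neg (h1 ▸ hgt)]

lemma B_wrap (n i : Int) (num : List Int) (hlen : 1 ≤ num.length)
    (hi1 : -(num.length : Int) - 1 ≤ i) (hi2 : i ≤ -2) :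
    findnextmax_alt n i num = findnextmax_alt n (-1) num := by
  have hL1 : 1 ≤ (num.length : Int) := by exact_mod_cast hlen
  have hsplit : PySem.List.pyRange (i + 1) (num.length : Int) 1
      = PySem.List.pyRange (i + 1) 0 1 ++ PySem.List.pyRange 0 (num.length : Int) 1 :=
    PySem.List.pyRange_one_append _ 0 _ (by omega) (by omega)
  have hfull : (PySem.List.pyRange 0 (num.length : Int) 1).filterMap
      (fun j => PySem.List.pyGet? num j) = num := by
    have := fm_drop num ((num.length : Int) - 0).toNat 0 (by omega) rfl
    simpa using this
  have hsuf_i : (PySem.List.pyRange (i + 1) (num.length : Int) 1).filterMap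
      (fun j => PySem.List.pyGet? num j)
      = ((PySem.List.pyRange (i + 1) 0 1).filterMap (fun j => PySem.List.pyGet? num j)) ++ num := by
    rw [hsplit, List.filterMap_append, hfull]
  have hw_mem : ∀ y ∈ (PySem.List.pyRange (i + 1) 0 1).filterMap
      (fun j => PySem.List.pyGet? num j), y ∈ num := by
    intro y hy
    obtain ⟨j, _, hj⟩ := List.mem_filterMap.1 hy
    exact PySem.List.mem_of_pyGet?_eq_some num hj
  obtain ⟨x, t, hxt⟩ := List.exists_cons_of_ne_nil (List.ne_nil_of_length_pos (by omega) : num ≠ [])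
  have hmax_eq : PySem.List.max? (((PySem.List.pyRange (i + 1) 0 1).filterMap
        (fun j => PySem.List.pyGet? num j)) ++ num) (fun y => y)
      = PySem.List.max? num (fun y => y) := by
    cases hwc : (PySem.List.pyRange (i + 1) 0 1).filterMap (fun j => PySem.List.pyGet? num j) with
    | nil => simp
    | cons w0 w' =>
        have hw_mem' : ∀ y ∈ w0 :: w', y ∈ num := by
          intro y hy
          exact hw_mem y (hwc ▸ hy)
        rw [hxt]
        rw [show (w0 :: w') ++ x :: t = w0 :: (w' ++ x :: t) from rfl,
          PySem.List.max?_id_cons, PySem.List.max?_id_cons]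
        have hM_ub : ∀ y ∈ x :: t, y ≤ t.foldl max x := by
          intro y hy
          rcases List.mem_cons.1 hy with h | h
          · subst h; exact (PySem.List.le_foldl_max t y).1
          · exact (PySem.List.le_foldl_max t x).2 y h
        have hV_ub : ∀ y ∈ w0 :: (w' ++ x :: t), y ≤ (w' ++ x :: t).foldl max w0 := by
          intro y hy
          rcases List.mem_cons.1 hy with h | h
          · subst h; exact (PySem.List.le_foldl_max _ y).1
          · exact (PySem.List.le_foldl_max _ w0).2 y h
        have hM_mem : t.foldl max x ∈ x :: t := by
          rcases PySem.List.foldl_max_mem t x with h | h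
          · rw [h]; exact List.mem_cons_self
          · exact List.mem_cons_of_mem _ h
        have hV_mem : (w' ++ x :: t).foldl max w0 ∈ w0 :: (w' ++ x :: t) := by
          rcases PySem.List.foldl_max_mem (w' ++ x :: t) w0 with h | h
          · rw [h]; exact List.mem_cons_self
          · exact List.mem_cons_of_mem _ h
        have hVnum : (w' ++ x :: t).foldl max w0 ∈ num := by
          rcases List.mem_cons.1 hV_mem with h | h
          · exact hw_mem' _ (by rw [h]; exact List.mem_cons_self)
          · rcases List.mem_append.1 h with h | h
            · exact hw_mem' _ (List.mem_cons_of_mem _ h)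
            · rw [hxt]; exact h
        have hVM : (w' ++ x :: t).foldl max w0 ≤ t.foldl max x :=
          hM_ub _ (hxt ▸ hVnum)
        have hMV : t.foldl max x ≤ (w' ++ x :: t).foldl max w0 :=
          hV_ub _ (List.mem_cons_of_mem _ (List.mem_append.2 (Or.inr hM_mem)))
        rw [le_antisymm hVM hMV]
  unfold findnextmax_alt
  dsimp only
  rw [hsuf_i, hmax_eq, show ((-1 : Int) + 1) = 0 by ring, hfull]

-- ===== VERDICT (by name: the statement is the Claim_ definition above) =====
theorem findnextmax_spec : Claim_equal_findnextmax := by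
  intro n i num _ hpre
  unfold Pre_findnextmax at hpre
  unfold Spec_findnextmax
  by_cases hi : -1 ≤ i
  · exact findnextmax_eq_alt_nonneg n i num hi
  · have hlen : 1 ≤ num.length := by
      by_contra h
      have : num.length = 0 := by omega
      rw [this] at hpre
      omega
    rw [A_wrap n i num hlen hpre (by omega), B_wrap n i num hlen hpre (by omega)]
    exact findnextmax_eq_alt_nonneg n (-1) num (by omega)
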